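-- pv_equiv track=rewrite | github.com/HappynessI/verl-for-AgentGym | examples/sglang_multiturn/my_exp/entropy_analysis/entropy_offline_minimax_traj.py | build_prefix_for_turn
-- ===== SOURCE A (Python) =====
-- from typing import Dict, List, Optional, Tuple, Any
--
-- def build_prefix_for_turn(conversations: List[Dict], turn_idx: int, role: str = "assistant") -> List[Dict]:
--     """
--     构建到第 turn_idx 个指定角色轮次之前的消息上下文。
--     用于让小模型预测该 turn 的 token 分布。
--
--     conversations 格式: [user, assistant, user, assistant, ...]
--     turn_idx: 第几个指定角色的 turn（0-indexed）
--     role: "assistant" 或 "user"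
--     """
--     prefix_messages = []
--     role_count = 0
--     for msg in conversations:
--         msg_role = msg.get("role")
--         if msg_role == role:
--             if role_count == turn_idx:
--                 break
--             role_count += 1
--         prefix_messages.append(msg)
--     return prefix_messages
-- ===== SOURCE B (Python) =====
-- from typing import Dict, List
--
-- def build_prefix_for_turn(conversations: List[Dict], turn_idx: int, role: str = "assistant") -> List[Dict]:
--     positions = [i for i, msg in enumerate(conversations) if msg.get("role") == role]
--     if 0 <= turn_idx < len(positions):
--         return conversations[:positions[turn_idx]]
--     return conversations[:]
-- ===== Notes on version B (the rewrite author's own statement) =====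
-- stated objective: alternative
-- what changed: Replaces the single accumulate-while-scanning loop (count role turns, break, append) with an index-building pass (enumerate + filter) followed by one slice at the found position, with the full-copy fallback for out-of-range or negative turn_idx.
import Mathlib
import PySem

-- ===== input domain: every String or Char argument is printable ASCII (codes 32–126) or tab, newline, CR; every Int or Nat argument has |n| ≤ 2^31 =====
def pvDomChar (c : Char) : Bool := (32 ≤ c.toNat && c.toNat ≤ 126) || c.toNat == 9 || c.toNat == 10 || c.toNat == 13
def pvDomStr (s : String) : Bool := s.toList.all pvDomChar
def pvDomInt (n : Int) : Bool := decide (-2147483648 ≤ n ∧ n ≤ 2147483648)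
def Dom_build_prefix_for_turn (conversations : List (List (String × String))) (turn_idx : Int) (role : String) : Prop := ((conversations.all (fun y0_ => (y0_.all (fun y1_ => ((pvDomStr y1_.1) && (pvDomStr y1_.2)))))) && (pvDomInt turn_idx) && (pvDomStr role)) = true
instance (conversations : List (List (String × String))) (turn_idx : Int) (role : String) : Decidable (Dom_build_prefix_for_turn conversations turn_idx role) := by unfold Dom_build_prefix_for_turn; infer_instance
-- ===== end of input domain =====

-- B replaces A's accumulate-while-counting loop by an enumerate/filter index pass plus one slice (alternative decomposition, same cost).

-- ===== PORT A =====
-- the for-loop with `break`: state = (role_count, prefix_messages); msg.get("role") = first-match lookup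
def bpftGo (turn_idx : Int) (role : String) :
    List (List (String × String)) → Int → List (List (String × String)) → List (List (String × String))
  | [], _, acc => acc
  | msg :: rest, role_count, acc =>
    if msg.lookup "role" == some role then
      if role_count == turn_idx then acc
      else bpftGo turn_idx role rest (role_count + 1) (acc ++ [msg])
    else bpftGo turn_idx role rest role_count (acc ++ [msg])

def build_prefix_for_turn (conversations : List (List (String × String))) (turn_idx : Int) (role : String) : List (List (String × String)) :=
  bpftGo turn_idx role conversations 0 []

-- ===== PORT B =====
def build_prefix_for_turn_alt (conversations : List (List (String × String))) (turn_idx : Int) (role : String) : List (List (String × String)) :=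
  let positions := ((PySem.List.enumerate conversations 0).filter (fun p => p.2.lookup "role" == some role)).map (·.1)
  if 0 ≤ turn_idx ∧ turn_idx < positions.length then
    -- conversations[:positions[turn_idx]]: the guard makes the index in range and the slice bound a nonnegative enumerate index
    conversations.take (positions.getD turn_idx.toNat 0).toNat
  else
    conversations

-- ===== PRECONDITION & SPEC =====
def Spec_build_prefix_for_turn (conversations : List (List (String × String))) (turn_idx : Int) (role : String) (out : List (List (String × String))) : Prop := out = build_prefix_for_turn_alt conversations turn_idx role
instance (conversations : List (List (String × String))) (turn_idx : Int) (role : String) (out : List (List (String × String))) : Decidable (Spec_build_prefix_for_turn conversations turn_idx role out) := by unfold Spec_build_prefix_for_turn; infer_instance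

-- ===== CLAIM (what is proved, stated in full; the proofs are below) =====
def Claim_equal_build_prefix_for_turn : Prop := ∀ (conversations : List (List (String × String))) (turn_idx : Int) (role : String), Dom_build_prefix_for_turn conversations turn_idx role → Spec_build_prefix_for_turn conversations turn_idx role (build_prefix_for_turn conversations turn_idx role)

-- ===== LEMMAS AND PROOFS =====

-- the common specification: the prefix before the t-th role-turn (whole list if none)
def pvF (role : String) : List (List (String × String)) → Int → List (List (String × String))
  | [], _ => []
  | msg :: rest, t =>
    if msg.lookup "role" == some role then
      (if t = 0 then [] else msg :: pvF role rest (t - 1))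
    else msg :: pvF role rest t

-- the (Nat) indices of the role-turns
def pvPos (role : String) : List (List (String × String)) → List Nat
  | [] => []
  | msg :: rest =>
    if msg.lookup "role" == some role then
      0 :: (pvPos role rest).map (· + 1)
    else (pvPos role rest).map (· + 1)

theorem bpftGo_eq (turn_idx : Int) (role : String) :
    ∀ (cs : List (List (String × String))) (rc : Int) (acc : List (List (String × String))),
      bpftGo turn_idx role cs rc acc = acc ++ pvF role cs (turn_idx - rc) := by
  intro cs
  induction cs with
  | nil => intro rc acc; simp [bpftGo, pvF]
  | cons msg rest ih =>
    intro rc acc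
    by_cases h : (msg.lookup "role" == some role) = true
    · by_cases hrc : rc = turn_idx
      · simp [bpftGo, pvF, h, hrc]
      · have hne : (rc == turn_idx) = false := by simp [hrc]
        have ht : ¬ (turn_idx - rc = 0) := by omega
        simp [bpftGo, pvF, h, hne, ht, ih]
        congr 1
        omega
    · have h' : (msg.lookup "role" == some role) = false := by
        simpa using h
      simp [bpftGo, pvF, h', ih]

theorem pv_map_shift (l : List Nat) (s : Int) :
    (l.map (· + 1)).map (fun n : Nat => (n : Int) + s) = l.map (fun n : Nat => (n : Int) + (s + 1)) := by
  rw [List.map_map]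
  apply List.map_congr_left
  intro n _
  simp only [Function.comp_apply]
  push_cast
  ring

theorem pv_getD_map_succ (l : List Nat) (k : Nat) (hk : k < l.length) :
    (l.map (· + 1)).getD k 0 = l.getD k 0 + 1 := by
  rw [List.getD_eq_getElem _ _ (by simpa using hk), List.getD_eq_getElem _ _ hk, List.getElem_map]

theorem pv_getD_cast (l : List Nat) (k : Nat) (hk : k < l.length) :
    ((l.map (fun n : Nat => (n : Int) + 0)).getD k 0).toNat = l.getD k 0 := by
  rw [List.getD_eq_getElem _ _ (by simpa using hk), List.getD_eq_getElem _ _ hk, List.getElem_map]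
  simp

theorem pvPos_eq (role : String) :
    ∀ (cs : List (List (String × String))) (s : Int),
      ((PySem.List.enumerate cs s).filter (fun p => p.2.lookup "role" == some role)).map (·.1)
        = (pvPos role cs).map (fun n : Nat => (n : Int) + s) := by
  intro cs
  induction cs with
  | nil => intro s; simp [PySem.List.enumerate_nil, pvPos]
  | cons msg rest ih =>
    intro s
    by_cases h : (msg.lookup "role" == some role) = true
    · simp only [PySem.List.enumerate_cons, List.filter_cons, h, if_true, List.map_cons,
        ih (s + 1), pvPos, pv_map_shift]
      norm_num
    · have h' : (msg.lookup "role" == some role) = false := by simpa using h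
      simp only [PySem.List.enumerate_cons, List.filter_cons, h', Bool.false_eq_true, if_false,
        ih (s + 1), pvPos, pv_map_shift]

theorem pvF_char (role : String) :
    ∀ (cs : List (List (String × String))) (t : Int),
      pvF role cs t =
        if 0 ≤ t ∧ t < (pvPos role cs).length then
          cs.take ((pvPos role cs).getD t.toNat 0)
        else cs := by
  intro cs
  induction cs with
  | nil => intro t; simp [pvF, pvPos]
  | cons msg rest ih =>
    intro t
    by_cases h : (msg.lookup "role" == some role) = true
    · simp only [pvF, pvPos, h, if_true]
      by_cases ht : t = 0
      · subst ht; simp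
      · by_cases hin : 0 ≤ t ∧ t < (((0 : Nat) :: (pvPos role rest).map (· + 1)).length : Int)
        · have hin' : 0 ≤ t - 1 ∧ t - 1 < ((pvPos role rest).length : Int) := by
            rcases hin with ⟨h0, hlt⟩
            simp only [List.length_cons, List.length_map] at hlt
            omega
          have hklt : (t - 1).toNat < (pvPos role rest).length := by
            rcases hin' with ⟨h0, hlt⟩; omega
          have hk : t.toNat = (t - 1).toNat + 1 := by
            rcases hin with ⟨h0, _⟩; omega
          have hgd : (((0 : Nat) :: (pvPos role rest).map (· + 1)).getD t.toNat 0)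
              = (pvPos role rest).getD (t - 1).toNat 0 + 1 := by
            rw [hk, List.getD_cons_succ, pv_getD_map_succ _ _ hklt]
          rw [if_pos hin, hgd, List.take_succ_cons, if_neg ht, ih (t - 1), if_pos hin']
        · have hin' : ¬ (0 ≤ t - 1 ∧ t - 1 < ((pvPos role rest).length : Int)) := by
            simp only [List.length_cons, List.length_map] at hin
            omega
          rw [if_neg hin, if_neg ht, ih (t - 1), if_neg hin']
    · have h' : (msg.lookup "role" == some role) = false := by simpa using h
      simp only [pvF, pvPos, h', Bool.false_eq_true, if_false]
      by_cases hin : 0 ≤ t ∧ t < (((pvPos role rest).map (· + 1)).length : Int)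
      · have hin' : 0 ≤ t ∧ t < ((pvPos role rest).length : Int) := by
          simpa using hin
        have hklt : t.toNat < (pvPos role rest).length := by
          rcases hin' with ⟨h0, hlt⟩; omega
        rw [if_pos hin, pv_getD_map_succ _ _ hklt, List.take_succ_cons, ih t, if_pos hin']
      · have hin' : ¬ (0 ≤ t ∧ t < ((pvPos role rest).length : Int)) := by
          simpa using hin
        rw [if_neg hin, ih t, if_neg hin']

theorem alt_eq_pvF (cs : List (List (String × String))) (t : Int) (role : String) :
    build_prefix_for_turn_alt cs t role = pvF role cs t := by
  rw [pvF_char]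
  unfold build_prefix_for_turn_alt
  rw [pvPos_eq]
  by_cases hin : 0 ≤ t ∧ t < ((pvPos role cs).length : Int)
  · have hklt : t.toNat < (pvPos role cs).length := by
      rcases hin with ⟨h0, hlt⟩; omega
    rw [if_pos (by simpa using hin), if_pos hin]
    congr 1
    exact pv_getD_cast _ _ hklt
  · rw [if_neg (by simpa using hin), if_neg hin]

-- ===== VERDICT (by name: the statement is the Claim_ definition above) =====
theorem build_prefix_for_turn_spec : Claim_equal_build_prefix_for_turn := by
  intro cs t role _
  show build_prefix_for_turn cs t role = build_prefix_for_turn_alt cs t role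
  rw [alt_eq_pvF]
  unfold build_prefix_for_turn
  rw [bpftGo_eq]
  simp
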